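-- pv_equiv track=rewrite | github.com/Nova840/Robot | Stuff/validate_input.py | _correctTypes
-- ===== SOURCE A (Python) =====
-- def _correctTypes(splitLine):
--     try:
--         if splitLine[0] == "L298N":
--             int(splitLine[1])
--             int(splitLine[2])
--             int(splitLine[3])
--             for i in range(len(splitLine[4:])):
--                 if i % 2 == 0:
--                     continue
--                 float(splitLine[i + 4])
--         elif splitLine[0] == "DRV8833":
--             int(splitLine[1])
--             int(splitLine[2])
--             for i in range(len(splitLine[3:])):
--                 if i % 2 == 0:
--                     continue
--                 float(splitLine[i + 3])
--         elif splitLine[0] == "SHUTDOWN":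
--             for i in range(len(splitLine[1:])):
--                 if i % 2 == 0:
--                     continue
--                 float(splitLine[i + 1])
--         elif _isServo(splitLine[0]):
--             int(splitLine[1])
--             float(splitLine[2])
--             float(splitLine[3])
--             float(splitLine[4])
--             for i in range(len(splitLine[5:])):
--                 if i % 2 == 0:
--                     continue
--                 float(splitLine[i + 5])
--
--         if splitLine[0] == "L298N":
--             for i in range(len(splitLine[4:])):
--                 if i % 2 == 1:
--                     continue
--                 if splitLine[i + 4][0:3] == "SWT":
--                     int(splitLine[i + 4][4:])
--         elif splitLine[0] == "DRV8833":
--             for i in range(len(splitLine[3:])):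
--                 if i % 2 == 1:
--                     continue
--                 if splitLine[i + 3][0:3] == "SWT":
--                     int(splitLine[i + 3][4:])
--         elif splitLine[0] == "SHUTDOWN":
--             for i in range(len(splitLine[1:])):
--                 if i % 2 == 1:
--                     continue
--                 if splitLine[i + 1][0:3] == "SWT":
--                     int(splitLine[i + 1][4:])
--         elif _isServo(splitLine[0]):
--             for i in range(len(splitLine[5:])):
--                 if i % 2 == 1:
--                     continue
--                 if splitLine[i + 5][0:3] == "SWT":
--                     int(splitLine[i + 5][4:])
--
--         return True
--     except:
--         return False
--
-- def _isServo(str):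
--     return str == "Servo_1" or str == "Servo_2" or str == "PCA9685_1" or str == "PCA9685_2"
-- ===== SOURCE B (Python) =====
-- # B: table-driven single-pass validator: one spec lookup replaces the duplicated
-- # four-branch, two-pass structure of A; same result on every input.
--
-- def _isServo(s):
--     return s in ("Servo_1", "Servo_2", "PCA9685_1", "PCA9685_2")
--
-- _SPECS = {"L298N": (4, (int, int, int)),
--           "DRV8833": (3, (int, int)),
--           "SHUTDOWN": (1, ())}
--
-- def _correctTypes(splitLine):
--     try:
--         head = splitLine[0]
--         if head in _SPECS:
--             offset, spec = _SPECS[head]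
--         elif _isServo(head):
--             offset, spec = 5, (int, float, float, float)
--         else:
--             return True
--         for k, ty in enumerate(spec):
--             ty(splitLine[k + 1])
--         for i, tok in enumerate(splitLine[offset:]):
--             if i % 2 == 1:
--                 float(tok)
--             elif tok[0:3] == "SWT":
--                 int(tok[4:])
--         return True
--     except:
--         return False
-- ===== Notes on version B (the rewrite author's own statement) =====
-- stated objective: simpler
-- what changed: Replaces A's four duplicated branch bodies and two separate index loops over splitLine[offset:] with a single (offset, type-spec) lookup table and one combined enumerate pass over the tail that does the odd-position float check and the even-position SWT check together.
import Mathlib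
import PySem

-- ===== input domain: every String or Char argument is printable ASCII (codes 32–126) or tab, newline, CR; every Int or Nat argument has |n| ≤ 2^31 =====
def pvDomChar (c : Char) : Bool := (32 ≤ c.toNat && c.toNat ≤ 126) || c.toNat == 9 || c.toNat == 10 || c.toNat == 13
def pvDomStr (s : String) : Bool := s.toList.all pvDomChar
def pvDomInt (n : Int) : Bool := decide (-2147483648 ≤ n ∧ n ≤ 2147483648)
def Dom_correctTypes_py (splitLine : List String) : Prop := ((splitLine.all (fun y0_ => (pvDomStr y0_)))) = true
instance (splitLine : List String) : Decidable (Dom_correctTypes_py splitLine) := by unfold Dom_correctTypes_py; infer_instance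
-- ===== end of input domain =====

-- B replaces A's four duplicated branch bodies and two index loops by one spec table and a
-- single enumerate pass (objective: simpler); same return value on every input.

-- ---- shared model of the built-in float(s): true iff Python float(s) succeeds (exact on the ASCII domain) ----
-- after one digit, consume (['_'] digit)* greedily
def pvDpMore : List Char → List Char
  | '_' :: c :: rest => if c.isDigit then pvDpMore rest else '_' :: c :: rest
  | c :: rest => if c.isDigit then pvDpMore rest else c :: rest
  | [] => []

-- digitpart: digit (['_'] digit)* ; returns the unconsumed rest, none if no leading digit
def pvDigitpart? : List Char → Option (List Char)
  | c :: rest => if c.isDigit then some (pvDpMore rest) else none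
  | [] => none

-- [sign] digitpart, consuming everything
def pvExpTail : List Char → Bool
  | '+' :: r => pvDigitpart? r == some []
  | '-' :: r => pvDigitpart? r == some []
  | r => pvDigitpart? r == some []

-- digitpart ['.' [digitpart]] | '.' digitpart
def pvMantissa? (cs : List Char) : Option (List Char) :=
  match pvDigitpart? cs with
  | some r =>
    match r with
    | '.' :: r2 =>
      match pvDigitpart? r2 with
      | some r3 => some r3
      | none => some r2
    | _ => some r
  | none =>
    match cs with
    | '.' :: r2 => pvDigitpart? r2
    | _ => none

def pvNumOk (cs : List Char) : Bool :=
  match pvMantissa? cs with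
  | none => false
  | some [] => true
  | some ('e' :: r) => pvExpTail r
  | some ('E' :: r) => pvExpTail r
  | some _ => false

def pvUnsignedOk (cs : List Char) : Bool :=
  pvNumOk cs ||
    (let l := PySem.Chars.lower cs
     l == ['i','n','f'] || l == ['i','n','f','i','n','i','t','y'] || l == ['n','a','n'])

def pvIsWs (c : Char) : Bool :=
  c == ' ' || c == '\t' || c == '\n' || c == '\r' || c.toNat == 11 || c.toNat == 12

def pvFloatOk (s : String) : Bool :=
  let cs := ((s.toList.dropWhile pvIsWs).reverse.dropWhile pvIsWs).reverse
  match cs with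
  | '+' :: r => pvUnsignedOk r
  | '-' :: r => pvUnsignedOk r
  | r => pvUnsignedOk r

-- ===== PORT A =====
def isServo_py (s : String) : Bool :=
  s == "Servo_1" || s == "Servo_2" || s == "PCA9685_1" || s == "PCA9685_2"

-- int(splitLine[i]) succeeds (IndexError or ValueError → false)
def pvIntAt (xs : List String) (i : Int) : Bool :=
  match PySem.List.pyGet? xs i with
  | some s => (PySem.Int.ofStr? s).isSome
  | none => false

-- float(splitLine[i]) succeeds
def pvFloatAt (xs : List String) (i : Int) : Bool :=
  match PySem.List.pyGet? xs i with
  | some s => pvFloatOk s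
  | none => false

-- for i in range(len(splitLine[k:])): if i % 2 == 0: continue; float(splitLine[i + k])
def pvOddFloats (xs : List String) (k : Int) : Bool :=
  (PySem.List.pyRange 0 ((PySem.List.slice xs (some k) none).length) 1).all
    (fun i => if PySem.Int.mod i 2 == 0 then true else pvFloatAt xs (i + k))

-- if splitLine[i][0:3] == "SWT": int(splitLine[i][4:])
def pvSwtAt (xs : List String) (i : Int) : Bool :=
  match PySem.List.pyGet? xs i with
  | some s =>
    if PySem.Str.slice s (some 0) (some 3) == "SWT"
    then (PySem.Int.ofStr? (PySem.Str.slice s (some 4) none)).isSome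
    else true
  | none => false

-- for i in range(len(splitLine[k:])): if i % 2 == 1: continue; SWT check at i + k
def pvEvenSwts (xs : List String) (k : Int) : Bool :=
  (PySem.List.pyRange 0 ((PySem.List.slice xs (some k) none).length) 1).all
    (fun i => if PySem.Int.mod i 2 == 1 then true else pvSwtAt xs (i + k))

def correctTypes_py (splitLine : List String) : Bool :=
  match PySem.List.pyGet? splitLine 0 with
  | none => false  -- splitLine[0] raises IndexError, caught: return False
  | some h =>
    (if h == "L298N" then
       pvIntAt splitLine 1 && pvIntAt splitLine 2 && pvIntAt splitLine 3 && pvOddFloats splitLine 4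
     else if h == "DRV8833" then
       pvIntAt splitLine 1 && pvIntAt splitLine 2 && pvOddFloats splitLine 3
     else if h == "SHUTDOWN" then
       pvOddFloats splitLine 1
     else if isServo_py h then
       pvIntAt splitLine 1 && pvFloatAt splitLine 2 && pvFloatAt splitLine 3 &&
         pvFloatAt splitLine 4 && pvOddFloats splitLine 5
     else true) &&
    (if h == "L298N" then pvEvenSwts splitLine 4
     else if h == "DRV8833" then pvEvenSwts splitLine 3
     else if h == "SHUTDOWN" then pvEvenSwts splitLine 1
     else if isServo_py h then pvEvenSwts splitLine 5
     else true)

-- ===== PORT B =====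
inductive PvTy
  | int
  | float
deriving DecidableEq, Repr

def pvIsServo (s : String) : Bool :=
  ["Servo_1", "Servo_2", "PCA9685_1", "PCA9685_2"].contains s

def pvSpecs : List (String × (Int × List PvTy)) :=
  [("L298N", (4, [.int, .int, .int])),
   ("DRV8833", (3, [.int, .int])),
   ("SHUTDOWN", (1, []))]

def pvCheckTy (ty : PvTy) (s : String) : Bool :=
  match ty with
  | .int => (PySem.Int.ofStr? s).isSome
  | .float => pvFloatOk s

-- the two loops of B's body: header types at positions 1.., then one pass over the tail
def pvCheck (xs : List String) (offset : Int) (spec : List PvTy) : Bool :=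
  ((PySem.List.enumerate spec).all fun kt =>
     match PySem.List.pyGet? xs (kt.1 + 1) with
     | some s => pvCheckTy kt.2 s
     | none => false) &&
  ((PySem.List.enumerate (PySem.List.slice xs (some offset) none)).all fun it =>
     if PySem.Int.mod it.1 2 == 1 then pvFloatOk it.2
     else if PySem.Str.slice it.2 (some 0) (some 3) == "SWT"
          then (PySem.Int.ofStr? (PySem.Str.slice it.2 (some 4) none)).isSome
          else true)

def correctTypes_py_alt (splitLine : List String) : Bool :=
  match PySem.List.pyGet? splitLine 0 with
  | none => false
  | some head =>
    match pvSpecs.lookup head with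
    | some (offset, spec) => pvCheck splitLine offset spec
    | none =>
      if pvIsServo head then pvCheck splitLine 5 [.int, .float, .float, .float]
      else true

-- ===== PRECONDITION & SPEC =====
def Spec_correctTypes_py (splitLine : List String) (out : Bool) : Prop := out = correctTypes_py_alt splitLine
instance (splitLine : List String) (out : Bool) : Decidable (Spec_correctTypes_py splitLine out) := by unfold Spec_correctTypes_py; infer_instance

-- ===== CLAIM (what is proved, stated in full; the proofs are below) =====
def Claim_equal_correctTypes_py : Prop := ∀ (splitLine : List String), Dom_correctTypes_py splitLine → Spec_correctTypes_py splitLine (correctTypes_py splitLine)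

-- ===== LEMMAS AND PROOFS =====

theorem pv_all_congr {α : Type} (l : List α) (f g : α → Bool)
    (h : ∀ x ∈ l, f x = g x) : l.all f = l.all g := by
  induction l with
  | nil => rfl
  | cons a t ih =>
    simp only [List.all_cons]
    rw [h a (by simp), ih (fun x hx => h x (by simp [hx]))]

theorem pv_all_and {α : Type} (l : List α) (f g : α → Bool) :
    (l.all f && l.all g) = l.all (fun x => f x && g x) := by
  induction l with
  | nil => rfl
  | cons a t ih =>
    simp only [List.all_cons]
    rw [← ih]
    cases f a <;> cases g a <;> cases t.all f <;> cases t.all g <;> rfl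

-- the heart: A's two index loops over splitLine[k:] equal B's single enumerate pass
theorem pv_loops_eq (xs : List String) (k : Nat) :
    (pvOddFloats xs (k : Int) && pvEvenSwts xs (k : Int)) =
      ((PySem.List.enumerate (PySem.List.slice xs (some (k : Int)) none)).all fun it =>
        if PySem.Int.mod it.1 2 == 1 then pvFloatOk it.2
        else if PySem.Str.slice it.2 (some 0) (some 3) == "SWT"
             then (PySem.Int.ofStr? (PySem.Str.slice it.2 (some 4) none)).isSome
             else true) := by
  rw [pvOddFloats, pvEvenSwts, pv_all_and,
      PySem.List.enumerate_eq_map_pyRange (PySem.List.slice xs (some (k : Int)) none) "",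
      List.all_map]
  refine pv_all_congr _ _ _ ?_
  intro i hi
  rw [PySem.List.mem_pyRange_one] at hi
  obtain ⟨hi0, hilt⟩ := hi
  obtain ⟨j, rfl⟩ : ∃ j : Nat, i = (j : Int) := ⟨i.toNat, (Int.toNat_of_nonneg hi0).symm⟩
  rw [PySem.List.slice_from_natCast] at hilt ⊢
  have hj : j < (xs.drop k).length := by exact_mod_cast hilt
  have hjk : j + k < xs.length := by simp [List.length_drop] at hj; omega
  have hget : PySem.List.pyGet? xs ((j : Int) + (k : Int)) = some (xs.drop k)[j] := by
    have : ((j : Int) + (k : Int)) = ((j + k : Nat) : Int) := by push_cast; ring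
    rw [this, PySem.List.pyGet?_natCast, List.getElem?_eq_getElem hjk]
    congr 1
    rw [List.getElem_drop]
    congr 1
    omega
  have hgetD : PySem.List.pyGetD (xs.drop k) (j : Int) "" = (xs.drop k)[j] := by
    rw [PySem.List.pyGetD_natCast, List.getD_eq_getElem?_getD, List.getElem?_eq_getElem hj]
    rfl
  have hm : PySem.Int.mod (j : Int) 2 = ((j % 2 : Nat) : Int) := by
    rw [PySem.Int.mod_eq_emod_of_pos]
    · omega
    · norm_num
  simp only [Function.comp_apply, hm, hgetD]
  rcases Nat.mod_two_eq_zero_or_one j with h2 | h2 <;>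
    simp [h2, pvFloatAt, pvSwtAt, hget]

-- one header element of B equals A's corresponding check
theorem pv_hdr_int (xs : List String) (i : Int) :
    (match PySem.List.pyGet? xs i with
     | some s => pvCheckTy PvTy.int s
     | none => false) = pvIntAt xs i := by
  cases h : PySem.List.pyGet? xs i <;> simp [pvIntAt, pvCheckTy, h]

theorem pv_hdr_float (xs : List String) (i : Int) :
    (match PySem.List.pyGet? xs i with
     | some s => pvCheckTy PvTy.float s
     | none => false) = pvFloatAt xs i := by
  cases h : PySem.List.pyGet? xs i <;> simp [pvFloatAt, pvCheckTy, h]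

-- ===== VERDICT (by name: the statement is the Claim_ definition above) =====
theorem correctTypes_py_spec : Claim_equal_correctTypes_py := by
  intro xs _
  unfold Spec_correctTypes_py correctTypes_py correctTypes_py_alt
  cases hx : PySem.List.pyGet? xs 0 with
  | none => rfl
  | some h =>
    have hl1 := pv_loops_eq xs 1
    have hl3 := pv_loops_eq xs 3
    have hl4 := pv_loops_eq xs 4
    have hl5 := pv_loops_eq xs 5
    norm_num at hl1 hl3 hl4 hl5
    by_cases h1 : h = "L298N"
    · subst h1
      simp only [pvSpecs, List.lookup, beq_self_eq_true, if_pos, pvCheck,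
        PySem.List.enumerate, List.all_cons, List.all_nil]
      norm_num [pv_hdr_int, ← hl4]
      generalize pvIntAt xs 1 = a
      generalize pvIntAt xs 2 = b
      generalize pvIntAt xs 3 = c
      generalize pvOddFloats xs 4 = d
      generalize pvEvenSwts xs 4 = e
      cases a <;> cases b <;> cases c <;> cases d <;> cases e <;> rfl
    by_cases h2 : h = "DRV8833"
    · subst h2
      simp only [pvSpecs, List.lookup, pvCheck, PySem.List.enumerate, List.all_cons, List.all_nil,
        show (("DRV8833" : String) == "L298N") = false from by decide,
        show (("DRV8833" : String) == "DRV8833") = true from by decide]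
      norm_num [pv_hdr_int, ← hl3]
      generalize pvIntAt xs 1 = a
      generalize pvIntAt xs 2 = b
      generalize pvOddFloats xs 3 = d
      generalize pvEvenSwts xs 3 = e
      cases a <;> cases b <;> cases d <;> cases e <;> rfl
    by_cases h3 : h = "SHUTDOWN"
    · subst h3
      simp only [pvSpecs, List.lookup, pvCheck, PySem.List.enumerate,
        show (("SHUTDOWN" : String) == "L298N") = false from by decide,
        show (("SHUTDOWN" : String) == "DRV8833") = false from by decide,
        show (("SHUTDOWN" : String) == "SHUTDOWN") = true from by decide]
      norm_num [← hl1]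
    -- head is in none of the dict keys
    have hlook : pvSpecs.lookup h = none := by
      simp [pvSpecs, List.lookup, beq_eq_false_iff_ne.mpr h1,
        beq_eq_false_iff_ne.mpr h2, beq_eq_false_iff_ne.mpr h3]
    have hs : pvIsServo h = isServo_py h := by
      simp [pvIsServo, isServo_py, List.contains_eq_mem, Bool.beq_eq_decide_eq, Bool.or_assoc]
    simp only [beq_iff_eq, h1, h2, h3, if_false, hlook, hs]
    by_cases hv : isServo_py h = true
    · simp only [hv, if_pos, pvCheck, PySem.List.enumerate, List.all_cons, List.all_nil]
      norm_num [pv_hdr_int, pv_hdr_float, ← hl5]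
      generalize pvIntAt xs 1 = a
      generalize pvFloatAt xs 2 = b
      generalize pvFloatAt xs 3 = c
      generalize pvFloatAt xs 4 = f
      generalize pvOddFloats xs 5 = d
      generalize pvEvenSwts xs 5 = e
      cases a <;> cases b <;> cases c <;> cases f <;> cases d <;> cases e <;> rfl
    · simp [hv]
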